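-- pv_equiv track=rewrite | github.com/andrewguo5/mbHUD | poker_hud/hand_parser.py | extract_player_from_action
-- ===== SOURCE A (Python) =====
-- from typing import List, Optional
--
-- def extract_player_from_action(line: str, known_players: List[str]) -> Optional[str]:
--     """
--     Extract player name from an action line, using known player list for matching.
--
--     Uses a greedy/longest-match strategy to handle player names with spaces.
--     For example, if known_players contains "Pointe After" and the line starts with
--     "Pointe After raises", we'll match "Pointe After" not just "Pointe".
--
--     Args:
--         line: Action line like "Pointe After raises $0.30 to $0.30"
--         known_players: List of player names from get_players_in_hand()
--
--     Returns:
--         Matched player name, or None if no match found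
--
--     Example:
--         >>> known = ["aampersands", "Pointe After", "Fise"]
--         >>> extract_player_from_action("Pointe After raises $0.30", known)
--         "Pointe After"
--         >>> extract_player_from_action("Fise folds", known)
--         "Fise"
--     """
--     line = line.strip()
--
--     # Try to match each known player, preferring longer names first
--     # This ensures "Pointe After" matches before "Pointe" would
--     sorted_players = sorted(known_players, key=len, reverse=True)
--
--     for player in sorted_players:
--         if line.startswith(player + ' '):
--             return player
--         # Also handle case where player name is the entire line (edge case)
--         if line == player:
--             return player
--
--     return None
-- ===== SOURCE B (Python) =====
-- from typing import List, Optional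
--
-- def extract_player_from_action(line: str, known_players: List[str]) -> Optional[str]:
--     line = line.strip()
--     best = None
--     for player in known_players:
--         if (line.startswith(player + ' ') or line == player) and \
--            (best is None or len(player) > len(best)):
--             best = player
--     return best
-- ===== Notes on version B (the rewrite author's own statement) =====
-- stated objective: simpler
-- what changed: Replaced sort-by-length-then-first-match with a single max-selection pass over known_players keeping the longest matching name (strict > so the earliest index wins ties, matching the stable sort); the sort disappears.
import Mathlib
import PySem

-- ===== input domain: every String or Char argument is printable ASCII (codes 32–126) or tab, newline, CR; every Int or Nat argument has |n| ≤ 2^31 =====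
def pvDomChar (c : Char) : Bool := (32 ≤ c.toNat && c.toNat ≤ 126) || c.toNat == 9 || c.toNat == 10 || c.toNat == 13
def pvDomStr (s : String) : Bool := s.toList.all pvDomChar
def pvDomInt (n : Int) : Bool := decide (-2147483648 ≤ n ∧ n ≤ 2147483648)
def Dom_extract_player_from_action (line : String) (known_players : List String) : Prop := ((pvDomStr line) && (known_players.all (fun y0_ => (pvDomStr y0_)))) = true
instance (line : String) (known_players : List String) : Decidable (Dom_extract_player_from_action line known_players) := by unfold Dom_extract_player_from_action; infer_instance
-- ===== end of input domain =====

-- B replaces A's sort-by-length-then-first-match by a single pass keeping the longest matching name (simpler, no sort).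

-- ===== PORT A =====
-- the for-loop over the sorted list: first player whose name (plus a space) prefixes the line, or equals it
def pvLoopA (line : String) : List String → Option String
  | [] => none
  | p :: rest =>
      if PySem.Str.startswith line (p ++ " ") then some p
      else if line = p then some p
      else pvLoopA line rest

def extract_player_from_action (line : String) (known_players : List String) : Option String :=
  let line := PySem.Str.strip line
  let sorted_players := PySem.List.sorted known_players (fun p => PySem.Str.len p) true
  pvLoopA line sorted_players

-- ===== PORT B =====
def pvBetter (best : Option String) (p : String) : Bool :=
  match best with
  | none => true
  | some b => decide (PySem.Str.len b < PySem.Str.len p)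

def pvStepB (line : String) (best : Option String) (p : String) : Option String :=
  if (PySem.Str.startswith line (p ++ " ") || line = p) && pvBetter best p then some p else best

def extract_player_from_action_alt (line : String) (known_players : List String) : Option String :=
  let line := PySem.Str.strip line
  known_players.foldl (pvStepB line) none

-- ===== PRECONDITION & SPEC =====
def Spec_extract_player_from_action (line : String) (known_players : List String) (out : Option String) : Prop := out = extract_player_from_action_alt line known_players
instance (line : String) (known_players : List String) (out : Option String) : Decidable (Spec_extract_player_from_action line known_players out) := by unfold Spec_extract_player_from_action; infer_instance

-- ===== CLAIM (what is proved, stated in full; the proofs are below) =====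
def Claim_equal_extract_player_from_action : Prop := ∀ (line : String) (known_players : List String), Dom_extract_player_from_action line known_players → Spec_extract_player_from_action line known_players (extract_player_from_action line known_players)

-- ===== LEMMAS AND PROOFS =====

-- the match predicate, for a (stripped) line
def pvP (line p : String) : Bool := PySem.Str.startswith line (p ++ " ") || line = p

-- both results are characterized by: the matching player of maximal length (none if no match)
def pvIsMax (line : String) (ks : List String) : Option String → Prop
  | none => ∀ q ∈ ks, pvP line q = false
  | some p => pvP line p = true ∧ p ∈ ks ∧ ∀ q ∈ ks, pvP line q = true → PySem.Str.len q ≤ PySem.Str.len p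

lemma pvP_prefix (line r : String) (h : PySem.Str.startswith line (r ++ " ") = true) :
    r.toList ++ [' '] <+: line.toList := by
  rw [PySem.Str.startswith_eq] at h
  have := (PySem.Chars.startswith_iff _ _).1 h
  simpa using this

-- two matching players of equal length are the same string
lemma pvP_len_inj (line p q : String) (hp : pvP line p = true) (hq : pvP line q = true)
    (hlen : PySem.Str.len p = PySem.Str.len q) : p = q := by
  have hlen' : p.toList.length = q.toList.length := by
    simpa [PySem.Str.len_eq, PySem.Chars.len] using hlen
  simp only [pvP, Bool.or_eq_true, decide_eq_true_eq] at hp hq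
  rcases hp with hp | hp
  · rcases hq with hq | hq
    · -- both prefix matches of equal length: equal
      have h1 := pvP_prefix line p hp
      have h2 := pvP_prefix line q hq
      have hl : (p.toList ++ [' ']).length = (q.toList ++ [' ']).length := by simp [hlen']
      have heq : p.toList ++ [' '] = q.toList ++ [' '] := by
        rcases List.prefix_or_prefix_of_prefix h1 h2 with h | h
        · exact h.eq_of_length hl
        · exact (h.eq_of_length hl.symm).symm
      exact String.toList_inj.mp (List.append_inj_left' heq (by simp))
    · -- p prefixes, q is the whole line: length contradiction
      have hle := (pvP_prefix line p hp).length_le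
      rw [List.length_append] at hle
      have hq' : line.length = q.length := by rw [hq]
      simp at hle hlen'
      omega
  · rcases hq with hq | hq
    · -- q prefixes, p is the whole line: length contradiction
      have hle := (pvP_prefix line q hq).length_le
      rw [List.length_append] at hle
      have hp' : line.length = p.length := by rw [hp]
      simp at hle hlen'
      omega
    · rw [← hp, ← hq]

-- the optimum is unique as an Option value
lemma pvIsMax_unique (line : String) (ks : List String) (o₁ o₂ : Option String)
    (h₁ : pvIsMax line ks o₁) (h₂ : pvIsMax line ks o₂) : o₁ = o₂ := by
  match o₁, o₂ with
  | none, none => rfl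
  | none, some q => exact absurd h₂.1 (by simp [h₁ q h₂.2.1])
  | some p, none => exact absurd h₁.1 (by simp [h₂ p h₁.2.1])
  | some p, some q =>
      have hpq := h₁.2.2 q h₂.2.1 h₂.1
      have hqp := h₂.2.2 p h₁.2.1 h₁.1
      rw [pvP_len_inj line p q h₁.1 h₂.1 (le_antisymm hqp hpq)]

-- A's loop on a length-descending list returns the first (hence longest) match
lemma pvLoopA_isMax (line : String) (l : List String)
    (hs : l.Pairwise (fun a b => PySem.Str.len b ≤ PySem.Str.len a)) :
    pvIsMax line l (pvLoopA line l) := by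
  induction l with
  | nil => intro q hq; simp at hq
  | cons p rest ih =>
      rcases List.pairwise_cons.1 hs with ⟨hhead, htail⟩
      by_cases h1 : PySem.Str.startswith line (p ++ " ") = true
      · have he : pvLoopA line (p :: rest) = some p := by
          simp only [pvLoopA]; rw [if_pos h1]
        rw [he]
        refine ⟨by unfold pvP; rw [h1]; rfl, List.mem_cons_self, ?_⟩
        intro q hq _
        rcases List.mem_cons.1 hq with h | h
        · subst h; exact le_refl _
        · exact hhead q h
      · by_cases h2 : line = p
        · have he : pvLoopA line (p :: rest) = some p := by
            simp only [pvLoopA]; rw [if_neg h1, if_pos h2]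
          rw [he]
          refine ⟨by unfold pvP; simp [h2], List.mem_cons_self, ?_⟩
          intro q hq _
          rcases List.mem_cons.1 hq with h | h
          · subst h; exact le_refl _
          · exact hhead q h
        · have h1' : PySem.Str.startswith line (p ++ " ") = false := Bool.eq_false_iff.mpr h1
          have hP : pvP line p = false := by unfold pvP; rw [h1']; simp [h2]
          have he : pvLoopA line (p :: rest) = pvLoopA line rest := by
            simp only [pvLoopA]; rw [if_neg h1, if_neg h2]
          rw [he]
          have hrest := ih htail
          match hres : pvLoopA line rest with
          | none =>
              rw [hres] at hrest
              intro q hq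
              rcases List.mem_cons.1 hq with h | h
              · subst h; exact hP
              · exact hrest q h
          | some r =>
              rw [hres] at hrest
              refine ⟨hrest.1, List.mem_cons_of_mem _ hrest.2.1, ?_⟩
              intro q hq hq'
              rcases List.mem_cons.1 hq with h | h
              · subst h; exact absurd hq' (by simp [hP])
              · exact hrest.2.2 q h hq'

-- B's fold: generalized invariant over the accumulator
lemma pvFoldB_char (line : String) (l : List String) (acc : Option String)
    (hacc : ∀ b, acc = some b → pvP line b = true) :
    match l.foldl (pvStepB line) acc with
    | none => acc = none ∧ ∀ q ∈ l, pvP line q = false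
    | some r => pvP line r = true ∧ (acc = some r ∨ r ∈ l) ∧
        (∀ q ∈ l, pvP line q = true → PySem.Str.len q ≤ PySem.Str.len r) ∧
        (∀ b, acc = some b → PySem.Str.len b ≤ PySem.Str.len r) := by
  induction l generalizing acc with
  | nil =>
      cases acc with
      | none => exact ⟨rfl, by simp⟩
      | some b =>
          refine ⟨hacc b rfl, Or.inl rfl, by simp, ?_⟩
          intro b' hb'; injection hb' with h; subst h; exact le_refl _
  | cons x t ih =>
      simp only [List.foldl_cons]
      by_cases hg : ((PySem.Str.startswith line (x ++ " ") || decide (line = x)) && pvBetter acc x) = true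
      · have hstep : pvStepB line acc x = some x := by unfold pvStepB; rw [if_pos hg]
        have hg' := hg
        rw [Bool.and_eq_true] at hg'
        obtain ⟨hPx', hbet⟩ := hg'
        have hPx : pvP line x = true := hPx'
        have hrec := ih (some x) (by intro b hb; injection hb with h; subst h; exact hPx)
        rw [hstep]
        match hres : t.foldl (pvStepB line) (some x) with
        | none => rw [hres] at hrec; exact absurd hrec.1 (by simp)
        | some r =>
            rw [hres] at hrec
            obtain ⟨hPr, hmem, hbound, haccb⟩ := hrec
            have hxr : PySem.Str.len x ≤ PySem.Str.len r := haccb x rfl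
            refine ⟨hPr, ?_, ?_, ?_⟩
            · rcases hmem with h | h
              · exact Or.inr (List.mem_cons.2 (Or.inl (Option.some.inj h).symm))
              · exact Or.inr (List.mem_cons_of_mem _ h)
            · intro q hq hq'
              rcases List.mem_cons.1 hq with h | h
              · subst h; exact hxr
              · exact hbound q h hq'
            · intro b hb
              rw [hb] at hbet
              have : PySem.Str.len b < PySem.Str.len x := by simpa [pvBetter] using hbet
              exact le_trans (le_of_lt this) hxr
      · have hstep : pvStepB line acc x = acc := by unfold pvStepB; rw [if_neg hg]
        have hrec := ih acc hacc
        rw [hstep]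
        match hres : t.foldl (pvStepB line) acc with
        | none =>
            rw [hres] at hrec
            obtain ⟨hnone, hall⟩ := hrec
            refine ⟨hnone, ?_⟩
            intro q hq
            rcases List.mem_cons.1 hq with h | h
            · subst h
              cases hPq : pvP line q with
              | false => rfl
              | true =>
                  exfalso; apply hg
                  subst hnone
                  rw [Bool.and_eq_true]
                  exact ⟨hPq, rfl⟩
            · exact hall q h
        | some r =>
            rw [hres] at hrec
            obtain ⟨hPr, hmem, hbound, haccb⟩ := hrec
            refine ⟨hPr, ?_, ?_, haccb⟩
            · rcases hmem with h | h
              · exact Or.inl h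
              · exact Or.inr (List.mem_cons_of_mem _ h)
            · intro q hq hq'
              rcases List.mem_cons.1 hq with h | h
              · subst h
                cases hab : acc with
                | none =>
                    exfalso; apply hg
                    rw [hab, Bool.and_eq_true]
                    exact ⟨hq', rfl⟩
                | some b =>
                    rw [hab] at haccb
                    have hnb : ¬ PySem.Str.len b < PySem.Str.len q := by
                      intro hlt
                      apply hg
                      rw [hab, Bool.and_eq_true]
                      exact ⟨hq', by simpa [pvBetter] using hlt⟩
                    exact le_trans (not_lt.1 hnb) (haccb b rfl)
              · exact hbound q h hq'

lemma pvFoldB_isMax (line : String) (ks : List String) :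
    pvIsMax line ks (ks.foldl (pvStepB line) none) := by
  have hrec := pvFoldB_char line ks none (by intro b hb; cases hb)
  match hres : ks.foldl (pvStepB line) none with
  | none => rw [hres] at hrec; exact hrec.2
  | some r =>
      rw [hres] at hrec
      obtain ⟨hPr, hmem, hbound, _⟩ := hrec
      refine ⟨hPr, ?_, hbound⟩
      rcases hmem with h | h
      · cases h
      · exact h

-- ===== VERDICT (by name: the statement is the Claim_ definition above) =====
theorem extract_player_from_action_spec : Claim_equal_extract_player_from_action := by
  intro line ks _
  show pvLoopA (PySem.Str.strip line) (PySem.List.sorted ks (fun p => PySem.Str.len p) true)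
      = ks.foldl (pvStepB (PySem.Str.strip line)) none
  have hA : pvIsMax (PySem.Str.strip line) ks
      (pvLoopA (PySem.Str.strip line) (PySem.List.sorted ks (fun p => PySem.Str.len p) true)) := by
    have hs := PySem.List.sorted_pairwise_rev (xs := ks) (key := fun p => PySem.Str.len p)
    have hmax := pvLoopA_isMax (PySem.Str.strip line) _ hs
    match hres : pvLoopA (PySem.Str.strip line) (PySem.List.sorted ks (fun p => PySem.Str.len p) true) with
    | none =>
        rw [hres] at hmax
        intro q hq
        exact hmax q ((PySem.List.mem_sorted _ _ _ _).2 hq)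
    | some r =>
        rw [hres] at hmax
        exact ⟨hmax.1, (PySem.List.mem_sorted _ _ _ _).1 hmax.2.1,
          fun q hq hq' => hmax.2.2 q ((PySem.List.mem_sorted _ _ _ _).2 hq) hq'⟩
  exact pvIsMax_unique (PySem.Str.strip line) ks _ _ hA (pvFoldB_isMax (PySem.Str.strip line) ks)
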